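-- pv_equiv track=rewrite | github.com/bgauzere/adventofcode | 2024/day_20.py | find_s_path
-- ===== SOURCE A (Python) =====
-- def find_s_path(data, start, visited=None, reachable=None, length=20):
--     # a special path s_path is a path that start with a "." and ends with a ".", all intermediate nodes are "#"
--     # the path isof length max_length
--     # start is assumed to be a "." node
--     if length == 0:
--         return
--
--     if visited is None:
--         visited = {start}
--     else:
--         visited.add(start)
--
--     if reachable is None:
--         reachable = set()
--
--     for dir in [(0, 1), (0, -1), (1, 0), (-1, 0)]:
--         new_node = (start[0] + dir[0], start[1] + dir[1])
--         if 0 <= new_node[0] < len(data) and 0 <= new_node[1] < len(data[0]):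
--             if data[new_node[0]][new_node[1]] in [".", "S", "E"]:
--                 reachable.add((new_node, length))
--                 # if new_node not in reachable:
--                 #     reachable[new_node] = length
--                 # else:
--                 #    reachable[new_node] = max(reachable[new_node], length)
--             if (
--                 data[new_node[0]][new_node[1]] == "#"
--                 and new_node not in visited
--             ):
--                 find_s_path(data, new_node, visited, reachable, length - 1)
--                 # find_s_path2(data, new_node, length - 1)
--     return reachable
-- ===== SOURCE B (Python) =====
-- def find_s_path(data, start, visited=None, reachable=None, length=20):
--     # Work-list formulation: instead of recursing, maintain a LIFO list of two
--     # kinds of tagged items -- ("visit", node, ln) expands a wall node into its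
--     # four direction probes, ("dir", node, ln, d) examines one neighbor.
--     # Return value only; like the original, the caller-supplied visited /
--     # reachable sets are mutated in place.
--     if length == 0:
--         return None
--     if visited is None:
--         visited = set()
--     if reachable is None:
--         reachable = set()
--     visited.add(start)
--     DIRS = ((0, 1), (0, -1), (1, 0), (-1, 0))
--     work = [("dir", start, length, d) for d in reversed(DIRS)]
--     while work:
--         item = work.pop()
--         if item[0] == "visit":
--             _, node, ln = item
--             if ln == 0:
--                 continue
--             visited.add(node)
--             for d in reversed(DIRS):
--                 work.append(("dir", node, ln, d))
--         else:
--             _, node, ln, d = item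
--             nxt = (node[0] + d[0], node[1] + d[1])
--             if 0 <= nxt[0] < len(data) and 0 <= nxt[1] < len(data[0]):
--                 cell = data[nxt[0]][nxt[1]]
--                 if cell in (".", "S", "E"):
--                     reachable.add((nxt, ln))
--                 if cell == "#" and nxt not in visited:
--                     work.append(("visit", nxt, ln - 1))
--     return reachable
-- ===== Notes on version B (the rewrite author's own statement) =====
-- stated objective: alternative
-- what changed: A's recursive wall-DFS is replaced by a non-recursive work-list machine over two kinds of tagged items: a 'visit' item expands a wall node into four direction probes, a 'dir' item examines one neighbor (recording open cells, pushing a 'visit' for a fresh wall); directions are pushed in reverse so LIFO popping reproduces A's visitation order exactly (B mutates the caller-supplied visited/reachable sets in place just as A does; the equivalence proved is about the return value).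
-- outside the precondition, e.g. on find_s_path(['a', ''], (0, 0), None, None, 3): A raises IndexError, B raises IndexError
import Mathlib
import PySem

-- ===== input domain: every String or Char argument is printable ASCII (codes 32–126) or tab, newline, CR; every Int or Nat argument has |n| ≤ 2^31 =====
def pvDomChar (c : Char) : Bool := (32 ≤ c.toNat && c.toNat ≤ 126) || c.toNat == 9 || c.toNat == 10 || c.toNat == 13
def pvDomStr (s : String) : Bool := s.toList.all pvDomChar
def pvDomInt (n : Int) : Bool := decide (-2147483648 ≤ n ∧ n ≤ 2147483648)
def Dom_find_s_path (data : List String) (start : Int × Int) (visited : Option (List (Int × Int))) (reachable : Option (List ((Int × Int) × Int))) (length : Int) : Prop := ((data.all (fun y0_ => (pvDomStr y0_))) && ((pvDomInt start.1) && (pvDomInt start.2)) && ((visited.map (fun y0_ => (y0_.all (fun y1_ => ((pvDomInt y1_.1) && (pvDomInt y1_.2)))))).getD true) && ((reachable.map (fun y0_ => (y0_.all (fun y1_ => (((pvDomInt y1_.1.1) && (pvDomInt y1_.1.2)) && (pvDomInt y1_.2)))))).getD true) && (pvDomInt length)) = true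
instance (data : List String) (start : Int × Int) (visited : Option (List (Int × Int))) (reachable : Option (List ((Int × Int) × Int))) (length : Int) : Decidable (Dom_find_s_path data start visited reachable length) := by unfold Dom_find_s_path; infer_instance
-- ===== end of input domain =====

-- B replaces A's recursive wall-DFS by a non-recursive work-list machine over two kinds of
-- tagged items ('visit' expands a wall node into four direction probes, 'dir' examines one
-- neighbor); equal RETURN value — like A, B mutates the caller-supplied visited/reachable
-- Python sets in place.

-- ===== PORT A =====

-- the four directions, in A's order
def pvDirs : List (Int × Int) := [(0, 1), (0, -1), (1, 0), (-1, 0)]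

-- bounds test `0 <= r < len(data) and 0 <= c < len(data[0])` (data[0] is only read by
-- Python when the first conjunct holds, so headD "" is exact there)
def pvInB (data : List String) (n : Int × Int) : Bool :=
  decide (0 ≤ n.1) && decide (n.1 < (data.length : Int)) &&
  decide (0 ≤ n.2) && decide (n.2 < (((data.headD "").toList.length : Int)))

-- `data[r][c]`; the ' ' default is reached only where Python raises IndexError (outside Pre_)
def pvCell (data : List String) (n : Int × Int) : Char :=
  (PySem.Str.pyGet? ((PySem.List.pyGet? data n.1).getD "") n.2).getD ' '

-- all in-bounds grid positions (used only to size the fuel guard below)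
def pvRect (data : List String) : List (Int × Int) :=
  (List.range data.length).flatMap
    (fun r : Nat =>
      (List.range ((data.headD "").toList.length)).map (fun c : Nat => ((r : Int), (c : Int))))

-- literal transliteration of A's recursion: the mutated visited/reachable sets are threaded
-- as state; `ds` is the remaining part of A's direction loop.  At the recursive call site the
-- callee's own first line (`if length == 0: return`) and its `visited.add(start)` are inlined.
-- `fuel` is a totalization guard only: the callers below provide more fuel than the recursion
-- can ever consume (each call strictly shrinks the unvisited in-bounds area).
def pvDfsA (data : List String) (fuel : Nat) (u : Int × Int) (ln : Int) (ds : List (Int × Int))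
    (v : List (Int × Int)) (r : List ((Int × Int) × Int)) :
    List (Int × Int) × List ((Int × Int) × Int) :=
  match fuel with
  | 0 => (v, r)
  | fuel + 1 =>
    match ds with
    | [] => (v, r)
    | d :: ds' =>
      let n : Int × Int := (u.1 + d.1, u.2 + d.2)
      if pvInB data n then
        let cell := pvCell data n
        let r1 := if cell = '.' ∨ cell = 'S' ∨ cell = 'E' then PySem.Set.add r (n, ln) else r
        if cell = '#' ∧ n ∉ v then
          if ln - 1 = 0 then pvDfsA data fuel u ln ds' v r1
          else
            let c := pvDfsA data fuel n (ln - 1) pvDirs (PySem.Set.add v n) r1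
            pvDfsA data fuel u ln ds' c.1 c.2
        else pvDfsA data fuel u ln ds' v r1
      else pvDfsA data fuel u ln ds' v r

def find_s_path (data : List String) (start : Int × Int) (visited : Option (List (Int × Int))) (reachable : Option (List ((Int × Int) × Int))) (length : Int) : Option (List ((Int × Int) × Int)) :=
  if length = 0 then none
  else
    let v := match visited with
      | none => PySem.Set.ofList [start]          -- {start}
      | some vs => PySem.Set.add vs start         -- visited.add(start)
    let r := match reachable with
      | none => PySem.Set.empty                   -- set()
      | some rs => rs
    some (pvDfsA data ((pvRect data).length * 5 + 5) start length pvDirs v r).2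

-- ===== PORT B =====

-- B's work items: ("visit", node, ln) and ("dir", node, ln, d)
inductive PvItem : Type
  | visit : Int × Int → Int → PvItem
  | dir : Int × Int → Int → Int × Int → PvItem
deriving DecidableEq, Repr

-- B's DIRS tuple
def pvDirsB : List (Int × Int) := [(0, 1), (0, -1), (1, 0), (-1, 0)]

-- the Python work list is a stack popped from the end; it is modelled head-as-top, so
-- `for d in reversed(DIRS): work.append(dir item)` is a foldl over reversed(DIRS) consing on.
-- The bounds test, `data[r][c]` (its ' ' default is reached only where Python raises
-- IndexError, outside Pre_) and `in (".", "S", "E")` are inlined just as in Source B.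
-- `gas` is only a totalization guard, oversized by the caller below.
def pvLoopB (data : List String) (gas : Nat) (work : List PvItem)
    (seen : List (Int × Int)) (found : List ((Int × Int) × Int)) : List ((Int × Int) × Int) :=
  match gas with
  | 0 => found
  | gas + 1 =>
    match work with
    | [] => found
    | PvItem.visit node lvl :: more =>
      if lvl == 0 then pvLoopB data gas more seen found
      else
        pvLoopB data gas (pvDirsB.reverse.foldl (fun st dv => PvItem.dir node lvl dv :: st) more)
          (PySem.Set.add seen node) found
    | PvItem.dir node lvl dv :: more =>
      let pos := (node.1 + dv.1, node.2 + dv.2)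
      if decide (0 ≤ pos.1 ∧ pos.1 < (data.length : Int) ∧ 0 ≤ pos.2 ∧ pos.2 < (((data.headD "").toList.length : Int))) then
        let sq := (PySem.Str.pyGet? ((PySem.List.pyGet? data pos.1).getD "") pos.2).getD ' '
        let found' := if ['.', 'S', 'E'].contains sq then PySem.Set.add found (pos, lvl) else found
        if sq == '#' && !(PySem.Set.contains seen pos) then
          pvLoopB data gas (PvItem.visit pos (lvl - 1) :: more) seen found'
        else pvLoopB data gas more seen found'
      else pvLoopB data gas more seen found

def find_s_path_alt (data : List String) (start : Int × Int) (visited : Option (List (Int × Int))) (reachable : Option (List ((Int × Int) × Int))) (length : Int) : Option (List ((Int × Int) × Int)) :=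
  if length == 0 then none
  else
    let seen0 := visited.getD PySem.Set.empty
    let found0 := reachable.getD PySem.Set.empty
    some (pvLoopB data (9 * data.length * (data.headD "").toList.length + 9)
      (pvDirsB.reverse.foldl (fun st dv => PvItem.dir start length dv :: st) [])
      (PySem.Set.add seen0 start) found0)

-- ===== PRECONDITION & SPEC =====
-- Pre_ excludes ragged grids (a row shorter than the first row) when the start cell touches
-- the grid: there Python may raise IndexError reading a short row.  Grids whose rows are all
-- at least as long as the first row, and starts too far from the grid for any cell to be
-- read, are all admitted.
def Pre_find_s_path (data : List String) (start : Int × Int) (visited : Option (List (Int × Int))) (reachable : Option (List ((Int × Int) × Int))) (length : Int) : Prop :=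
  (∀ s ∈ data, (data.headD "").toList.length ≤ s.toList.length) ∨
  (start.1 < -1 ∨ (data.length : Int) < start.1 ∨
   start.2 < -1 ∨ (((data.headD "").toList.length : Int)) < start.2)
instance (data : List String) (start : Int × Int) (visited : Option (List (Int × Int))) (reachable : Option (List ((Int × Int) × Int))) (length : Int) : Decidable (Pre_find_s_path data start visited reachable length) := by unfold Pre_find_s_path; infer_instance

def pvWitness_find_s_path : List String × (Int × Int) × (Option (List (Int × Int))) × (Option (List ((Int × Int) × Int))) × Int :=
  ([".#.", "#..", "..E"], (0, 0), none, none, 3)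

def Spec_find_s_path (data : List String) (start : Int × Int) (visited : Option (List (Int × Int))) (reachable : Option (List ((Int × Int) × Int))) (length : Int) (out : Option (List ((Int × Int) × Int))) : Prop := out = find_s_path_alt data start visited reachable length
instance (data : List String) (start : Int × Int) (visited : Option (List (Int × Int))) (reachable : Option (List ((Int × Int) × Int))) (length : Int) (out : Option (List ((Int × Int) × Int))) : Decidable (Spec_find_s_path data start visited reachable length out) := by unfold Spec_find_s_path; infer_instance

-- ===== CLAIM (what is proved, stated in full; the proofs are below) =====
def Claim_equal_find_s_path : Prop := ∀ (data : List String) (start : Int × Int) (visited : Option (List (Int × Int))) (reachable : Option (List ((Int × Int) × Int))) (length : Int), Dom_find_s_path data start visited reachable length → Pre_find_s_path data start visited reachable length → Spec_find_s_path data start visited reachable length (find_s_path data start visited reachable length)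

-- ===== LEMMAS AND PROOFS =====

def pvUnvis (data : List String) (v : List (Int × Int)) : Nat :=
  (pvRect data).countP (fun p => !(PySem.Set.contains v p))

-- A-call measure: the fuel the call can still consume
def pvMuA (data : List String) (ds : List (Int × Int)) (v : List (Int × Int)) : Nat :=
  pvUnvis data v * 5 + ds.length

-- a direction frame (node, ln, d) and its reading as a B work item
def pvToItem (f : (Int × Int) × Int × (Int × Int)) : PvItem := PvItem.dir f.1 f.2.1 f.2.2

-- one direction frame interpreted through A: A's loop body for the single direction f.2.2,
-- with its own (always sufficient) canonical fuel
def pvStep1 (data : List String) (f : (Int × Int) × Int × (Int × Int))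
    (s : List (Int × Int) × List ((Int × Int) × Int)) :
    List (Int × Int) × List ((Int × Int) × Int) :=
  pvDfsA data (pvMuA data [f.2.2] s.1 + 1) f.1 f.2.1 [f.2.2] s.1 s.2

-- bridges between the two ports' primitive spellings
theorem pvGridB_eq (data : List String) (x y : Int) :
    decide (0 ≤ x ∧ x < (data.length : Int) ∧ 0 ≤ y ∧ y < (((data.headD "").toList.length : Int))) =
      pvInB data (x, y) := by
  unfold pvInB
  rw [Bool.eq_iff_iff]
  simp only [Bool.and_eq_true, decide_eq_true_eq]
  tauto

theorem pvOpenIf_eq (c : Char) (X Y : List ((Int × Int) × Int)) :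
    (if ['.', 'S', 'E'].contains c then X else Y) =
      (if c = '.' ∨ c = 'S' ∨ c = 'E' then X else Y) := by
  have h : (['.', 'S', 'E'].contains c = true) ↔ (c = '.' ∨ c = 'S' ∨ c = 'E') := by
    simp [List.contains_eq_mem]
  by_cases hc : c = '.' ∨ c = 'S' ∨ c = 'E'
  · rw [if_pos (h.mpr hc), if_pos hc]
  · rw [if_neg (fun hb => hc (h.mp hb)), if_neg hc]

theorem pvWallB_iff (c : Char) (v : List (Int × Int)) (n : Int × Int) :
    (c == '#' && !(PySem.Set.contains v n)) = true ↔ (c = '#' ∧ n ∉ v) := by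
  simp [PySem.Set.contains_eq_listContains, List.contains_eq_mem]

theorem pvRect_len (data : List String) :
    (pvRect data).length = data.length * (data.headD "").toList.length := by
  unfold pvRect
  rw [List.length_flatMap]
  simp [List.map_const']

theorem pvDfsA_nil (data : List String) (fuel : Nat) (u : Int × Int) (ln : Int)
    (v : List (Int × Int)) (r : List ((Int × Int) × Int)) :
    pvDfsA data fuel u ln [] v r = (v, r) := by
  cases fuel <;> rfl

theorem pvDfsA_succ (data : List String) (fuel : Nat) (u : Int × Int) (ln : Int)
    (d : Int × Int) (ds' : List (Int × Int))
    (v : List (Int × Int)) (r : List ((Int × Int) × Int)) :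
    pvDfsA data (fuel + 1) u ln (d :: ds') v r =
      (if pvInB data (u.1 + d.1, u.2 + d.2) then
        (if pvCell data (u.1 + d.1, u.2 + d.2) = '#' ∧ (u.1 + d.1, u.2 + d.2) ∉ v then
          (if ln - 1 = 0 then
            pvDfsA data fuel u ln ds' v
              (if pvCell data (u.1 + d.1, u.2 + d.2) = '.' ∨ pvCell data (u.1 + d.1, u.2 + d.2) = 'S' ∨ pvCell data (u.1 + d.1, u.2 + d.2) = 'E' then
                PySem.Set.add r ((u.1 + d.1, u.2 + d.2), ln) else r)
          else
            pvDfsA data fuel u ln ds'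
              (pvDfsA data fuel (u.1 + d.1, u.2 + d.2) (ln - 1) pvDirs
                (PySem.Set.add v (u.1 + d.1, u.2 + d.2))
                (if pvCell data (u.1 + d.1, u.2 + d.2) = '.' ∨ pvCell data (u.1 + d.1, u.2 + d.2) = 'S' ∨ pvCell data (u.1 + d.1, u.2 + d.2) = 'E' then
                  PySem.Set.add r ((u.1 + d.1, u.2 + d.2), ln) else r)).1
              (pvDfsA data fuel (u.1 + d.1, u.2 + d.2) (ln - 1) pvDirs
                (PySem.Set.add v (u.1 + d.1, u.2 + d.2))
                (if pvCell data (u.1 + d.1, u.2 + d.2) = '.' ∨ pvCell data (u.1 + d.1, u.2 + d.2) = 'S' ∨ pvCell data (u.1 + d.1, u.2 + d.2) = 'E' then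
                  PySem.Set.add r ((u.1 + d.1, u.2 + d.2), ln) else r)).2)
        else
          pvDfsA data fuel u ln ds' v
            (if pvCell data (u.1 + d.1, u.2 + d.2) = '.' ∨ pvCell data (u.1 + d.1, u.2 + d.2) = 'S' ∨ pvCell data (u.1 + d.1, u.2 + d.2) = 'E' then
              PySem.Set.add r ((u.1 + d.1, u.2 + d.2), ln) else r))
      else pvDfsA data fuel u ln ds' v r) := rfl

theorem pvLoopB_nil (data : List String) (fuel : Nat)
    (v : List (Int × Int)) (r : List ((Int × Int) × Int)) :
    pvLoopB data fuel [] v r = r := by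
  cases fuel <;> rfl

theorem pvLoopB_visit (data : List String) (fuel : Nat) (u : Int × Int) (ln : Int)
    (rest : List PvItem) (v : List (Int × Int)) (r : List ((Int × Int) × Int)) :
    pvLoopB data (fuel + 1) (PvItem.visit u ln :: rest) v r =
      (if ln == 0 then pvLoopB data fuel rest v r
       else
        pvLoopB data fuel (pvDirsB.reverse.foldl (fun st d => PvItem.dir u ln d :: st) rest)
          (PySem.Set.add v u) r) := rfl

theorem pvLoopB_dir (data : List String) (fuel : Nat) (u : Int × Int) (ln : Int)
    (d : Int × Int) (rest : List PvItem)
    (v : List (Int × Int)) (r : List ((Int × Int) × Int)) :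
    pvLoopB data (fuel + 1) (PvItem.dir u ln d :: rest) v r =
      (if decide (0 ≤ u.1 + d.1 ∧ u.1 + d.1 < (data.length : Int) ∧ 0 ≤ u.2 + d.2 ∧ u.2 + d.2 < (((data.headD "").toList.length : Int))) then
        (if pvCell data (u.1 + d.1, u.2 + d.2) == '#' && !(PySem.Set.contains v (u.1 + d.1, u.2 + d.2)) then
          pvLoopB data fuel (PvItem.visit (u.1 + d.1, u.2 + d.2) (ln - 1) :: rest) v
            (if ['.', 'S', 'E'].contains (pvCell data (u.1 + d.1, u.2 + d.2)) then
              PySem.Set.add r ((u.1 + d.1, u.2 + d.2), ln) else r)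
        else
          pvLoopB data fuel rest v
            (if ['.', 'S', 'E'].contains (pvCell data (u.1 + d.1, u.2 + d.2)) then
              PySem.Set.add r ((u.1 + d.1, u.2 + d.2), ln) else r))
      else pvLoopB data fuel rest v r) := rfl

-- pushing the four reversed direction items = prepending the direction frames in order
theorem pvPush_eq (u : Int × Int) (ln : Int) (rest : List PvItem) :
    pvDirsB.reverse.foldl (fun st d => PvItem.dir u ln d :: st) rest =
      ((pvDirs.map (fun d => (u, ln, d))).map pvToItem) ++ rest := rfl

theorem pvSublist_add {α : Type} [BEq α] (s : PySem.Set α) (x : α) : s.Sublist (PySem.Set.add s x) := by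
  unfold PySem.Set.add; split
  · exact List.Sublist.refl s
  · exact List.sublist_append_left s [x]

theorem pvUnvis_mono (data : List String) {v v' : List (Int × Int)} (h : v.Sublist v') :
    pvUnvis data v' ≤ pvUnvis data v := by
  unfold pvUnvis
  refine List.countP_mono_left (fun p _ hp => ?_)
  simp only [Bool.not_eq_eq_eq_not, Bool.not_true, PySem.Set.contains_eq_listContains,
    List.contains_eq_mem, decide_eq_false_iff_not] at *
  exact fun hv => hp (h.mem hv)

theorem pvCountP_lt {α : Type} (l : List α) (p q : α → Bool)
    (himp : ∀ a, q a = true → p a = true) {x : α}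
    (hx : x ∈ l) (hq : q x = false) (hp : p x = true) :
    l.countP q < l.countP p := by
  induction l with
  | nil => cases hx
  | cons a t ih =>
    simp only [List.countP_cons]
    rcases List.mem_cons.mp hx with rfl | hx'
    · have hle := List.countP_mono_left (l := t) (p := q) (q := p) (fun a _ h => himp a h)
      simp [hq, hp]
      omega
    · have h1 := ih hx'
      have h2 : (if q a = true then 1 else 0) ≤ (if p a = true then 1 else 0) := by
        by_cases hqa : q a = true
        · simp [hqa, himp a hqa]
        · simp [hqa]
      omega

theorem pvUnvis_add_lt (data : List String) {v : List (Int × Int)} {n : Int × Int}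
    (hmem : n ∈ pvRect data) (hnv : n ∉ v) :
    pvUnvis data (PySem.Set.add v n) < pvUnvis data v := by
  unfold pvUnvis
  refine pvCountP_lt _ _ _ (fun p hp => ?_) hmem ?_ ?_
  · simp only [Bool.not_eq_eq_eq_not, Bool.not_true, PySem.Set.contains_eq_listContains,
      List.contains_eq_mem, decide_eq_false_iff_not] at *
    exact fun hv => hp ((PySem.Set.mem_add _ _ _).2 (Or.inl hv))
  · have hmem' : n ∈ PySem.Set.add v n := (PySem.Set.mem_add v n n).2 (Or.inr rfl)
    simp [PySem.Set.contains_eq_listContains, List.contains_eq_mem, hmem']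
  · simp only [Bool.not_eq_eq_eq_not, Bool.not_true, PySem.Set.contains_eq_listContains,
      List.contains_eq_mem, decide_eq_false_iff_not]
    exact hnv

theorem pvMem_rect_aux (data : List String) (a b : Nat) (ha : a < data.length)
    (hb : b < (data.headD "").toList.length) : ((a : Int), (b : Int)) ∈ pvRect data := by
  unfold pvRect
  refine List.mem_flatMap.2 ⟨a, List.mem_range.2 ha, ?_⟩
  exact List.mem_map.2 ⟨b, List.mem_range.2 hb, rfl⟩

theorem pvMem_rect (data : List String) {n : Int × Int} (hb : pvInB data n = true) :
    n ∈ pvRect data := by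
  unfold pvInB at hb
  simp only [Bool.and_eq_true, decide_eq_true_eq] at hb
  obtain ⟨⟨⟨h1, h2⟩, h3⟩, h4⟩ := hb
  have hn : n = ((n.1.toNat : Int), (n.2.toNat : Int)) := by
    rw [Int.toNat_of_nonneg h1, Int.toNat_of_nonneg h3]
  rw [hn]
  exact pvMem_rect_aux data n.1.toNat n.2.toNat (by omega) (by omega)

theorem pvUnvis_le_rect (data : List String) (v : List (Int × Int)) :
    pvUnvis data v ≤ (pvRect data).length := by
  unfold pvUnvis
  exact List.countP_le_length

-- the result's visited list extends the input's
theorem pvDfsA_sublist (data : List String) :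
    ∀ (fuel : Nat) (u : Int × Int) (ln : Int) (ds : List (Int × Int))
      (v : List (Int × Int)) (r : List ((Int × Int) × Int)),
      v.Sublist (pvDfsA data fuel u ln ds v r).1 := by
  intro fuel
  induction fuel with
  | zero => intro u ln ds v r; exact List.Sublist.refl v
  | succ fuel ih =>
    intro u ln ds v r
    cases ds with
    | nil => rw [pvDfsA_nil]
    | cons d ds' =>
      rw [pvDfsA_succ]
      by_cases hb : pvInB data (u.1 + d.1, u.2 + d.2) = true
      · rw [if_pos hb]
        by_cases hw : pvCell data (u.1 + d.1, u.2 + d.2) = '#' ∧ (u.1 + d.1, u.2 + d.2) ∉ v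
        · rw [if_pos hw]
          by_cases hz : ln - 1 = 0
          · rw [if_pos hz]; exact ih u ln ds' v _
          · rw [if_neg hz]
            exact ((pvSublist_add v _).trans (ih _ _ pvDirs _ _)).trans (ih u ln ds' _ _)
        · rw [if_neg hw]; exact ih u ln ds' v _
      · rw [if_neg hb]; exact ih u ln ds' v r

-- any two sufficient fuels compute the same result
theorem pvDfsA_irrel (data : List String) :
    ∀ (fuel fuel' : Nat) (u : Int × Int) (ln : Int) (ds : List (Int × Int))
      (v : List (Int × Int)) (r : List ((Int × Int) × Int)),
      pvMuA data ds v < fuel → pvMuA data ds v < fuel' →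
      pvDfsA data fuel u ln ds v r = pvDfsA data fuel' u ln ds v r := by
  intro fuel
  induction fuel with
  | zero => intro fuel' u ln ds v r h1 _; omega
  | succ fuel ih =>
    intro fuel' u ln ds v r h1 h2
    match fuel', h2 with
    | fuel' + 1, h2 =>
      cases ds with
      | nil => rw [pvDfsA_nil, pvDfsA_nil]
      | cons d ds' =>
        have hlen : pvMuA data ds' v < pvMuA data (d :: ds') v := by
          unfold pvMuA; simp only [List.length_cons]; omega
        rw [pvDfsA_succ, pvDfsA_succ]
        by_cases hb : pvInB data (u.1 + d.1, u.2 + d.2) = true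
        · rw [if_pos hb, if_pos hb]
          by_cases hw : pvCell data (u.1 + d.1, u.2 + d.2) = '#' ∧ (u.1 + d.1, u.2 + d.2) ∉ v
          · rw [if_pos hw, if_pos hw]
            by_cases hz : ln - 1 = 0
            · rw [if_pos hz, if_pos hz]
              exact ih fuel' u ln ds' v _ (by omega) (by omega)
            · rw [if_neg hz, if_neg hz]
              have hchild : pvMuA data pvDirs (PySem.Set.add v (u.1 + d.1, u.2 + d.2)) <
                  pvMuA data (d :: ds') v := by
                have := pvUnvis_add_lt data (pvMem_rect data hb) hw.2
                have h4 : pvDirs.length = 4 := rfl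
                unfold pvMuA
                simp only [List.length_cons]
                omega
              rw [← ih fuel' (u.1 + d.1, u.2 + d.2) (ln - 1) pvDirs
                (PySem.Set.add v (u.1 + d.1, u.2 + d.2))
                (if pvCell data (u.1 + d.1, u.2 + d.2) = '.' ∨ pvCell data (u.1 + d.1, u.2 + d.2) = 'S' ∨ pvCell data (u.1 + d.1, u.2 + d.2) = 'E' then
                  PySem.Set.add r ((u.1 + d.1, u.2 + d.2), ln) else r)
                (by omega) (by omega)]
              have hsub := (pvSublist_add v (u.1 + d.1, u.2 + d.2)).trans
                (pvDfsA_sublist data fuel (u.1 + d.1, u.2 + d.2) (ln - 1) pvDirs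
                  (PySem.Set.add v (u.1 + d.1, u.2 + d.2))
                  (if pvCell data (u.1 + d.1, u.2 + d.2) = '.' ∨ pvCell data (u.1 + d.1, u.2 + d.2) = 'S' ∨ pvCell data (u.1 + d.1, u.2 + d.2) = 'E' then
                    PySem.Set.add r ((u.1 + d.1, u.2 + d.2), ln) else r))
              have hm := pvUnvis_mono data hsub
              refine ih fuel' u ln ds' _ _ ?_ ?_
              · unfold pvMuA at *; simp only [List.length_cons] at *; omega
              · unfold pvMuA at *; simp only [List.length_cons] at *; omega
          · rw [if_neg hw, if_neg hw]
            exact ih fuel' u ln ds' v _ (by omega) (by omega)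
        · rw [if_neg hb, if_neg hb]
          exact ih fuel' u ln ds' v r (by omega) (by omega)

-- pvStep1 on an out-of-grid direction is the identity
theorem pvStep1_out (data : List String) (u : Int × Int) (ln : Int) (d : Int × Int)
    (hb : ¬ pvInB data (u.1 + d.1, u.2 + d.2) = true)
    (v : List (Int × Int)) (r : List ((Int × Int) × Int)) :
    pvStep1 data (u, ln, d) (v, r) = (v, r) := by
  unfold pvStep1
  simp only
  rw [show pvMuA data [d] v + 1 = (pvMuA data [d] v) + 1 from rfl, pvDfsA_succ, if_neg hb,
    pvDfsA_nil]

-- pvStep1 when no fresh wall recursion happens: only reachable may grow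
theorem pvStep1_nowall (data : List String) (u : Int × Int) (ln : Int) (d : Int × Int)
    (hb : pvInB data (u.1 + d.1, u.2 + d.2) = true)
    {v : List (Int × Int)}
    (hnw : ¬ (pvCell data (u.1 + d.1, u.2 + d.2) = '#' ∧ (u.1 + d.1, u.2 + d.2) ∉ v ∧ ln - 1 ≠ 0))
    (r : List ((Int × Int) × Int)) :
    pvStep1 data (u, ln, d) (v, r) =
      (v, if pvCell data (u.1 + d.1, u.2 + d.2) = '.' ∨ pvCell data (u.1 + d.1, u.2 + d.2) = 'S' ∨ pvCell data (u.1 + d.1, u.2 + d.2) = 'E' then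
            PySem.Set.add r ((u.1 + d.1, u.2 + d.2), ln) else r) := by
  unfold pvStep1
  simp only
  rw [pvDfsA_succ, if_pos hb]
  by_cases hw2 : pvCell data (u.1 + d.1, u.2 + d.2) = '#' ∧ (u.1 + d.1, u.2 + d.2) ∉ v
  · have hz : ln - 1 = 0 := by
      by_contra hz
      exact hnw ⟨hw2.1, hw2.2, hz⟩
    rw [if_pos hw2, if_pos hz, pvDfsA_nil]
  · rw [if_neg hw2, pvDfsA_nil]

-- pvStep1 on a fresh wall with budget left: the whole child call, at canonical fuel
theorem pvStep1_wall (data : List String) (u : Int × Int) (ln : Int) (d : Int × Int)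
    (hb : pvInB data (u.1 + d.1, u.2 + d.2) = true)
    {v : List (Int × Int)}
    (hw : pvCell data (u.1 + d.1, u.2 + d.2) = '#' ∧ (u.1 + d.1, u.2 + d.2) ∉ v ∧ ln - 1 ≠ 0)
    (r : List ((Int × Int) × Int)) :
    pvStep1 data (u, ln, d) (v, r) =
      pvDfsA data (pvMuA data pvDirs (PySem.Set.add v (u.1 + d.1, u.2 + d.2)) + 1)
        (u.1 + d.1, u.2 + d.2) (ln - 1) pvDirs (PySem.Set.add v (u.1 + d.1, u.2 + d.2))
        (if pvCell data (u.1 + d.1, u.2 + d.2) = '.' ∨ pvCell data (u.1 + d.1, u.2 + d.2) = 'S' ∨ pvCell data (u.1 + d.1, u.2 + d.2) = 'E' then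
          PySem.Set.add r ((u.1 + d.1, u.2 + d.2), ln) else r) := by
  unfold pvStep1
  simp only
  rw [pvDfsA_succ, if_pos hb, if_pos (show _ ∧ _ from ⟨hw.1, hw.2.1⟩), if_neg hw.2.2]
  have hlt := pvUnvis_add_lt data (pvMem_rect data hb) hw.2.1
  have h4 : pvDirs.length = 4 := rfl
  have h1 : [d].length = 1 := rfl
  rw [pvDfsA_nil]
  refine pvDfsA_irrel data _ _ _ _ _ _ _ ?_ ?_
  · unfold pvMuA at *; rw [h4]; rw [h1] at *; omega
  · omega

-- A's direction loop is the fold of pvStep1 over its direction frames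
theorem pvDfsA_foldl (data : List String) :
    ∀ (fuel : Nat) (u : Int × Int) (ln : Int) (ds : List (Int × Int))
      (v : List (Int × Int)) (r : List ((Int × Int) × Int)),
      pvMuA data ds v < fuel →
      pvDfsA data fuel u ln ds v r =
        ds.foldl (fun s d => pvStep1 data (u, ln, d) s) (v, r) := by
  intro fuel
  induction fuel with
  | zero => intro u ln ds v r h; omega
  | succ fuel ih =>
    intro u ln ds v r h
    cases ds with
    | nil => rw [pvDfsA_nil]; rfl
    | cons d ds' =>
      have hlen : pvMuA data ds' v < pvMuA data (d :: ds') v := by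
        unfold pvMuA; simp only [List.length_cons]; omega
      rw [pvDfsA_succ]
      simp only [List.foldl_cons]
      by_cases hb : pvInB data (u.1 + d.1, u.2 + d.2) = true
      · rw [if_pos hb]
        by_cases hw : pvCell data (u.1 + d.1, u.2 + d.2) = '#' ∧ (u.1 + d.1, u.2 + d.2) ∉ v
        · rw [if_pos hw]
          by_cases hz : ln - 1 = 0
          · rw [if_pos hz]
            rw [ih u ln ds' v _ (by omega)]
            rw [pvStep1_nowall data u ln d hb (fun hc => hc.2.2 hz) r]
          · rw [if_neg hz]
            have hmu : pvMuA data pvDirs (PySem.Set.add v (u.1 + d.1, u.2 + d.2)) <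
                pvMuA data (d :: ds') v := by
              have := pvUnvis_add_lt data (pvMem_rect data hb) hw.2
              have h4 : pvDirs.length = 4 := rfl
              unfold pvMuA
              simp only [List.length_cons]
              omega
            rw [pvStep1_wall data u ln d hb ⟨hw.1, hw.2, hz⟩ r]
            rw [pvDfsA_irrel data fuel
              (pvMuA data pvDirs (PySem.Set.add v (u.1 + d.1, u.2 + d.2)) + 1)
              (u.1 + d.1, u.2 + d.2) (ln - 1) pvDirs
              (PySem.Set.add v (u.1 + d.1, u.2 + d.2)) _ (by omega) (by omega)]
            have hsub := (pvSublist_add v (u.1 + d.1, u.2 + d.2)).trans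
              (pvDfsA_sublist data
                (pvMuA data pvDirs (PySem.Set.add v (u.1 + d.1, u.2 + d.2)) + 1)
                (u.1 + d.1, u.2 + d.2) (ln - 1) pvDirs
                (PySem.Set.add v (u.1 + d.1, u.2 + d.2))
                (if pvCell data (u.1 + d.1, u.2 + d.2) = '.' ∨ pvCell data (u.1 + d.1, u.2 + d.2) = 'S' ∨ pvCell data (u.1 + d.1, u.2 + d.2) = 'E' then
                  PySem.Set.add r ((u.1 + d.1, u.2 + d.2), ln) else r))
            have hm := pvUnvis_mono data hsub
            refine ih u ln ds' _ _ ?_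
            unfold pvMuA at *
            simp only [List.length_cons] at *
            omega
        · rw [if_neg hw]
          rw [ih u ln ds' v _ (by omega)]
          rw [pvStep1_nowall data u ln d hb (fun hc => hw ⟨hc.1, hc.2.1⟩) r]
      · rw [if_neg hb]
        rw [ih u ln ds' v r (by omega)]
        rw [pvStep1_out data u ln d hb v r]

-- B-loop measure over direction-frame stacks
def pvMuB (data : List String) (frames : List ((Int × Int) × Int × (Int × Int)))
    (v : List (Int × Int)) : Nat :=
  9 * pvUnvis data v + 2 * frames.length

-- B's work-list machine, on a stack of direction items, folds pvStep1 over the frames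
theorem pvLoopB_eq_foldl (data : List String) :
    ∀ (fuel : Nat) (frames : List ((Int × Int) × Int × (Int × Int)))
      (v : List (Int × Int)) (r : List ((Int × Int) × Int)),
      pvMuB data frames v < fuel →
      pvLoopB data fuel (frames.map pvToItem) v r =
        (frames.foldl (fun s f => pvStep1 data f s) (v, r)).2 := by
  intro fuel
  induction fuel using Nat.strong_induction_on with
  | _ fuel ih =>
    intro frames v r h
    match fuel, h with
    | fuel + 1, h =>
      cases frames with
      | nil => rw [List.map_nil, pvLoopB_nil]; rfl
      | cons f rest =>
        obtain ⟨u, ln, d⟩ := f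
        simp only [List.map_cons, List.foldl_cons]
        rw [show pvToItem (u, ln, d) = PvItem.dir u ln d from rfl, pvLoopB_dir]
        rw [pvGridB_eq data (u.1 + d.1) (u.2 + d.2)]
        have hmu0 : pvMuB data ((u, ln, d) :: rest) v =
            9 * pvUnvis data v + 2 * rest.length + 2 := by
          unfold pvMuB; simp only [List.length_cons]; omega
        by_cases hb : pvInB data (u.1 + d.1, u.2 + d.2) = true
        · rw [if_pos hb]
          simp only [pvOpenIf_eq]
          by_cases hwB : (pvCell data (u.1 + d.1, u.2 + d.2) == '#' &&
              !(PySem.Set.contains v (u.1 + d.1, u.2 + d.2))) = true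
          · rw [if_pos hwB]
            have hw := (pvWallB_iff _ v _).mp hwB
            -- the pushed visit item is popped immediately: take a second step
            match fuel, h with
            | fuel + 1, h =>
              rw [pvLoopB_visit]
              by_cases hz : ln - 1 = 0
              · rw [if_pos (by simp [hz])]
                rw [ih fuel (by omega) rest v _ (by unfold pvMuB at *; omega)]
                rw [pvStep1_nowall data u ln d hb (fun hc => hc.2.2 hz) r]
              · rw [if_neg (by simp [hz])]
                have hlt := pvUnvis_add_lt data (pvMem_rect data hb) hw.2
                rw [pvPush_eq, ← List.map_append]
                rw [ih fuel (by omega) _ _ _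
                  (by
                    unfold pvMuB at *
                    simp only [List.length_append, List.length_map, List.length_cons] at *
                    have h4 : (pvDirs.map (fun d' => ((u.1 + d.1, u.2 + d.2), ln - 1, d'))).length = 4 := rfl
                    simp only [List.length_map] at h4
                    omega)]
                rw [List.foldl_append, List.foldl_map]
                rw [pvStep1_wall data u ln d hb ⟨hw.1, hw.2, hz⟩ r]
                rw [pvDfsA_foldl data _ _ _ _ _ _ (by omega)]
          · rw [if_neg hwB]
            have hnw : ¬ (pvCell data (u.1 + d.1, u.2 + d.2) = '#' ∧
                (u.1 + d.1, u.2 + d.2) ∉ v ∧ ln - 1 ≠ 0) := by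
              intro hc
              exact hwB ((pvWallB_iff _ v _).mpr ⟨hc.1, hc.2.1⟩)
            rw [ih fuel (by omega) rest v _ (by unfold pvMuB at *; omega)]
            rw [pvStep1_nowall data u ln d hb hnw r]
        · rw [if_neg hb]
          rw [ih fuel (by omega) rest v r (by unfold pvMuB at *; omega)]
          rw [pvStep1_out data u ln d hb v r]

-- the two ports agree for any initial visited/reachable state
theorem pvPorts_eq (data : List String) (start : Int × Int) (v0 : List (Int × Int))
    (r0 : List ((Int × Int) × Int)) (length : Int) :
    (pvDfsA data ((pvRect data).length * 5 + 5) start length pvDirs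
      (PySem.Set.add v0 start) r0).2 =
    pvLoopB data (9 * data.length * (data.headD "").toList.length + 9)
      (pvDirsB.reverse.foldl (fun st dv => PvItem.dir start length dv :: st) [])
      (PySem.Set.add v0 start) r0 := by
  have hR := pvUnvis_le_rect data (PySem.Set.add v0 start)
  have hRl := pvRect_len data
  have h4d : pvDirs.length = 4 := rfl
  have h4f : (pvDirs.map (fun d => (start, length, d))).length = 4 := by
    simp [h4d]
  rw [show (pvDirsB.reverse.foldl (fun st dv => PvItem.dir start length dv :: st) ([] : List PvItem)) =
      (pvDirs.map (fun d => (start, length, d))).map pvToItem from rfl]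
  rw [pvLoopB_eq_foldl data _ _ _ _ (by
    unfold pvMuB
    rw [h4f, Nat.mul_assoc]
    have h1 : pvUnvis data (PySem.Set.add v0 start) ≤
        data.length * (data.headD "").toList.length := hRl ▸ hR
    have h2 := Nat.mul_le_mul_left 9 h1
    omega)]
  rw [pvDfsA_foldl data _ _ _ _ _ _ (by unfold pvMuA; rw [h4d]; omega)]
  rw [List.foldl_map]

-- ===== VERDICT (by name: the statement is the Claim_ definition above) =====
theorem find_s_path_spec : Claim_equal_find_s_path := by
  intro data start visited reachable length _ _
  unfold Spec_find_s_path find_s_path find_s_path_alt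
  by_cases h0 : length = 0
  · simp [h0]
  · have h0b : ¬ ((length == 0) = true) := by simp [h0]
    simp only [if_neg h0, if_neg h0b]
    cases visited with
    | none =>
      cases reachable with
      | none => exact congrArg some (pvPorts_eq data start PySem.Set.empty PySem.Set.empty length)
      | some rs => exact congrArg some (pvPorts_eq data start PySem.Set.empty rs length)
    | some vs =>
      cases reachable with
      | none => exact congrArg some (pvPorts_eq data start vs PySem.Set.empty length)
      | some rs => exact congrArg some (pvPorts_eq data start vs rs length)
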